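-- pv_equiv track=rewrite | github.com/lollocenne/Automa-Riconoscitore | zztest.py | ottimizzaSequenze
-- ===== SOURCE A (Python) =====
-- def ottimizzaSequenze(sequenze: list[str]) -> list[str]:
--     def accorciaSequenze(seqe: list[str]) -> list[str]:
--         res = []
--         for s in seqe:
--             maxIdx = 0
--             n = len(s)
--             for s2 in res:
--                 if n > len(s2): continue
--                 for i in range(maxIdx, n+1):
--                     if s[:i] == s2[:i]:
--                         maxIdx = i
--             s = s[maxIdx:]
--             if s and s not in res:
--                 res.append(s)
--         return res
--
--     def rimuoviSimili(seqe: list[str]) -> list[str]: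
--         res = []
--         for s in seqe:
--             if s[1:] not in [seq[1:] for seq in res]:
--                 res.append(s)
--         return res
--
--     return accorciaSequenze(rimuoviSimili(sequenze))
-- ===== SOURCE B (Python) =====
-- def ottimizzaSequenze(sequenze: list[str]) -> list[str]:
--     # stage 1: keep the first string for each distinct 1-suffix
--     visti = set()
--     uniche = []
--     for s in sequenze:
--         k = s[1:]
--         if k not in visti:
--             visti.add(k)
--             uniche.append(s)
--
--     # stage 2: a trie of the trimmed results; each node = [isEnd, maxLen, children],
--     # maxLen = max length among strings inserted through this node.
--     root = [False, 0, {}]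
--     res = []
--     for s in uniche:
--         n = len(s)
--         # deepest depth along s whose node has subtree max length >= n
--         node, d, best = root, 0, 0
--         while True:
--             if node[1] >= n:
--                 best = d
--             if d == n:
--                 break
--             nxt = node[2].get(s[d])
--             if nxt is None:
--                 break
--             node, d = nxt, d + 1
--         t = s[best:]
--         if not t:
--             continue
--         # membership check in the trie
--         node = root
--         for c in t:
--             node = node[2].get(c)
--             if node is None:
--                 break
--         if node is not None and node[0]:
--             continue
--         # insert t into the trie
--         m = len(t)
--         node = root
--         node[1] = max(node[1], m)
--         for c in t:
--             child = node[2].get(c)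
--             if child is None:
--                 child = [False, 0, {}]
--                 node[2][c] = child
--             node = child
--             node[1] = max(node[1], m)
--         node[0] = True
--         res.append(t)
--     return res
-- ===== Notes on version B (the rewrite author's own statement) =====
-- stated objective: faster
-- what changed: accorciaSequenze's nested scan over all previous results and all prefix lengths is replaced by a trie of the trimmed results whose nodes store the max length inserted through them: one descent along s yields the deepest depth with subtree-max-length >= len(s) (the trim point), and membership/insertion are trie walks instead of list scans; the suffix dedup keeps a seen-set instead of rebuilding a suffix list per iteration.
import Mathlib
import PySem

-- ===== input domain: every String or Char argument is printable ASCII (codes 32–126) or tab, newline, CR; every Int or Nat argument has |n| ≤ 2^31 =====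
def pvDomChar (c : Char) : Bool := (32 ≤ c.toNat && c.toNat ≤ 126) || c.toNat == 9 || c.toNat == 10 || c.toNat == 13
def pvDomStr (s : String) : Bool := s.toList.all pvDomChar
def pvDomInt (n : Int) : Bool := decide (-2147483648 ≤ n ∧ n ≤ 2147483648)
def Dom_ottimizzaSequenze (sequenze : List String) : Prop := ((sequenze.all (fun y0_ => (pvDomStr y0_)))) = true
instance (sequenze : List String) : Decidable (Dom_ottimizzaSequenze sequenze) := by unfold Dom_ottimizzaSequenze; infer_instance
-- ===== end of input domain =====

-- B replaces A's nested prefix-slice scans with a trie of the trimmed results, each node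
-- storing the max length among strings inserted through it (objective: faster data structure).


-- ===== PORT A =====
-- Strings are handled as their character lists; all slice indices here are nonnegative,
-- so s[1:] is drop 1, s[:i] is take i, s[maxIdx:] is drop maxIdx, and range(maxIdx, n+1)
-- is List.range' maxIdx (n+1-maxIdx) — exact for these nonnegative bounds.
def pvA_rimuoviSimili (seqe : List (List Char)) : List (List Char) :=
  seqe.foldl
    (fun (res : List (List Char)) (s : List Char) =>
      if s.drop 1 ∈ res.map (fun seq => seq.drop 1) then res else res ++ [s])
    ([] : List (List Char))

def pvA_accorciaSequenze (seqe : List (List Char)) : List (List Char) :=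
  seqe.foldl
    (fun (res : List (List Char)) (s : List Char) =>
      let n := s.length
      let maxIdx :=
        res.foldl
          (fun maxIdx s2 =>
            if n > s2.length then maxIdx
            else
              (List.range' maxIdx (n + 1 - maxIdx)).foldl
                (fun acc i => if s.take i = s2.take i then i else acc) maxIdx)
          0
      let t := s.drop maxIdx
      if t ≠ [] ∧ t ∉ res then res ++ [t] else res)
    ([] : List (List Char))

def ottimizzaSequenze (sequenze : List String) : List String :=
  (pvA_accorciaSequenze (pvA_rimuoviSimili (sequenze.map String.toList))).map String.ofList

-- ===== PORT B =====
-- B's trie: node = (isEnd, maxLen, children); children as an explicit mutual list type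
-- (a Python dict Char -> node, ported as a first-match association structure).
mutual
inductive PvTrie : Type where
  | node : Bool → Nat → PvKids → PvTrie
inductive PvKids : Type where
  | nil : PvKids
  | cons : Char → PvTrie → PvKids → PvKids
end

def pvEmptyTrie : PvTrie := .node false 0 .nil

-- children.get(c) of the Python dict
def pvFindChild : PvKids → Char → Option PvTrie
  | .nil, _ => none
  | .cons c t rest, x => if x = c then some t else pvFindChild rest x

-- children[c] = t of the Python dict (overwrite in place, insertion order kept)
def pvSetChild : PvKids → Char → PvTrie → PvKids
  | .nil, x, t => .cons x t .nil
  | .cons c u rest, x, t => if x = c then .cons c t rest else .cons c u (pvSetChild rest x t)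

-- B's query loop: walk the trie along s, tracking depth d and the deepest depth `best`
-- whose node has maxLen >= n
def pvQuery : PvTrie → List Char → Nat → Nat → Nat → Nat
  | .node _ ml kids, cs, n, d, best =>
      let best' := if n ≤ ml then d else best
      match cs with
      | [] => best'
      | c :: rest =>
        match pvFindChild kids c with
        | none => best'
        | some ch => pvQuery ch rest n (d + 1) best'

-- B's membership walk
def pvContains : PvTrie → List Char → Bool
  | .node e _ _, [] => e
  | .node _ _ kids, c :: rest =>
      match pvFindChild kids c with
      | none => false
      | some ch => pvContains ch rest

-- B's insert loop: mark the end node and update maxLen along the path with m = len(t)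
def pvInsert : PvTrie → List Char → Nat → PvTrie
  | .node _ ml kids, [], m => .node true (max ml m) kids
  | .node e ml kids, c :: rest, m =>
      let ch := (pvFindChild kids c).getD pvEmptyTrie
      .node e (max ml m) (pvSetChild kids c (pvInsert ch rest m))

-- stage 1: keep the first string for each distinct 1-suffix (a seen-set of suffixes)
def pvB_dedup (sequenze : List (List Char)) : PySem.Set (List Char) × List (List Char) :=
  sequenze.foldl
    (fun (st : PySem.Set (List Char) × List (List Char)) s =>
      let suf := s.drop 1
      if PySem.Set.contains st.1 suf then st
      else (PySem.Set.add st.1 suf, st.2 ++ [s]))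
    (PySem.Set.empty, [])

-- stage 2: trim each string at the deepest trie depth whose subtree holds a string of
-- length >= len(s); keep it if non-empty and not already in the trie
def pvB_trim (uniche : List (List Char)) : PvTrie × List (List Char) :=
  uniche.foldl
    (fun (st : PvTrie × List (List Char)) s =>
      let n := s.length
      let best := pvQuery st.1 s n 0 0
      let t := s.drop best
      if t = [] then st
      else if pvContains st.1 t then st
      else (pvInsert st.1 t t.length, st.2 ++ [t]))
    (pvEmptyTrie, [])

def ottimizzaSequenze_alt (sequenze : List String) : List String :=
  ((pvB_trim (pvB_dedup (sequenze.map String.toList)).2).2).map String.ofList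

-- ===== PRECONDITION & SPEC =====
def Spec_ottimizzaSequenze (sequenze : List String) (out : List String) : Prop := out = ottimizzaSequenze_alt sequenze
instance (sequenze : List String) (out : List String) : Decidable (Spec_ottimizzaSequenze sequenze out) := by unfold Spec_ottimizzaSequenze; infer_instance

-- ===== CLAIM (what is proved, stated in full; the proofs are below) =====
def Claim_equal_ottimizzaSequenze : Prop := ∀ (sequenze : List String), Dom_ottimizzaSequenze sequenze → Spec_ottimizzaSequenze sequenze (ottimizzaSequenze sequenze)

-- ===== LEMMAS AND PROOFS =====

-- longest common prefix: the abstraction both loops are proved against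
def pvLcp : List Char → List Char → Nat
  | a :: as, b :: bs => if a = b then pvLcp as bs + 1 else 0
  | _, _ => 0

theorem pvLcp_le_left (a b : List Char) : pvLcp a b ≤ a.length := by
  induction a generalizing b with
  | nil => cases b <;> simp [pvLcp]
  | cons x xs ih =>
    cases b with
    | nil => simp [pvLcp]
    | cons y ys =>
      simp only [pvLcp]
      split
      · simpa using ih ys
      · simp

theorem take_eq_iff_le_lcp (a b : List Char) (i : Nat) (hi : i ≤ a.length) :
    a.take i = b.take i ↔ i ≤ pvLcp a b := by
  induction a generalizing b i with
  | nil =>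
    have h0 : i = 0 := by simpa using hi
    subst h0
    cases b <;> simp [pvLcp]
  | cons x xs ih =>
    cases i with
    | zero => simp
    | succ j =>
      cases b with
      | nil => simp [pvLcp]
      | cons y ys =>
        simp only [List.take_succ_cons, pvLcp, List.cons.injEq]
        by_cases hxy : x = y
        · simp [hxy, ih ys j (by simpa using hi)]
        · simp [hxy]

theorem rfold_if_le (L : Nat) :
    ∀ (k m a : Nat),
      (List.range' m k).foldl (fun acc i => if i ≤ L then i else acc) a =
        if m ≤ L ∧ 1 ≤ k then min L (m + k - 1) else a := by
  intro k
  induction k with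
  | zero => intro m a; simp
  | succ k ih =>
    intro m a
    rw [List.range'_succ, List.foldl_cons, ih]
    split_ifs <;> omega

-- A's inner range-scan over prefix lengths equals max maxIdx (pvLcp s s2)
theorem inner_eq_max (s s2 : List Char) (m : Nat) :
    (List.range' m (s.length + 1 - m)).foldl
        (fun acc i => if s.take i = s2.take i then i else acc) m =
      max m (pvLcp s s2) := by
  set L := pvLcp s s2 with hL
  have hLn : L ≤ s.length := pvLcp_le_left s s2
  have hcong :
      (List.range' m (s.length + 1 - m)).foldl
          (fun acc i => if s.take i = s2.take i then i else acc) m =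
        (List.range' m (s.length + 1 - m)).foldl (fun acc i => if i ≤ L then i else acc) m := by
    apply PySem.List.foldl_congr_mem
    intro acc i hi
    have hiR := List.mem_range'_1.mp hi
    have h1 : i ≤ s.length := by omega
    by_cases h : i ≤ L
    · simp [h, (take_eq_iff_le_lcp s s2 i h1).mpr h]
    · have : ¬ s.take i = s2.take i := fun hc => h ((take_eq_iff_le_lcp s s2 i h1).mp hc)
      simp [h, this]
  rw [hcong, rfold_if_le]
  by_cases hm : m ≤ L
  · by_cases hk : 1 ≤ s.length + 1 - m
    · simp only [hm, hk, and_self, if_true]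
      omega
    · simp only [hk, and_false, if_false]
      omega
  · simp only [hm, false_and, if_false]
    omega

theorem contains_iff_mem (xs : List (List Char)) (t : List Char) :
    PySem.Set.contains xs t = true ↔ t ∈ xs := by
  simp [PySem.Set.contains]

-- dedup phases agree: B's suffix set is exactly the suffixes of the result list
theorem dedup_eq :
    ∀ (seqe res : List (List Char)),
      seqe.foldl
          (fun res s =>
            if s.drop 1 ∈ res.map (fun seq => seq.drop 1) then res else res ++ [s]) res =
        (seqe.foldl
            (fun (st : PySem.Set (List Char) × List (List Char)) s =>
              let suf := s.drop 1
              if PySem.Set.contains st.1 suf then st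
              else (PySem.Set.add st.1 suf, st.2 ++ [s]))
            (res.map (fun seq => seq.drop 1), res)).2 := by
  intro seqe
  induction seqe with
  | nil => intro res; simp
  | cons s rest ih =>
    intro res
    simp only [List.foldl_cons]
    by_cases h : s.drop 1 ∈ res.map (fun seq => seq.drop 1)
    · have hc : PySem.Set.contains (res.map (fun seq => seq.drop 1)) (s.drop 1) = true :=
        (contains_iff_mem _ _).mpr h
      simp only [h, if_true, hc, if_true]
      exact ih res
    · have hc : ¬ PySem.Set.contains (res.map (fun seq => seq.drop 1)) (s.drop 1) = true :=
        fun hx => h ((contains_iff_mem _ _).mp hx)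
      simp only [h, if_false, PySem.Set.add, if_neg hc]
      have hmap : (res ++ [s]).map (fun seq => seq.drop 1) =
          res.map (fun seq => seq.drop 1) ++ [s.drop 1] := by simp
      rw [← hmap]
      exact ih (res ++ [s])

-- trie child lookup after update
theorem findChild_setChild_self : ∀ (kids : PvKids) (c : Char) (t : PvTrie),
    pvFindChild (pvSetChild kids c t) c = some t
  | .nil, c, t => by simp [pvSetChild, pvFindChild]
  | .cons c' u rest, c, t => by
    by_cases h : c = c'
    · simp [pvSetChild, pvFindChild, h]
    · simp [pvSetChild, pvFindChild, h, findChild_setChild_self rest c t]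

theorem findChild_setChild_ne : ∀ (kids : PvKids) (c x : Char) (t : PvTrie), x ≠ c →
    pvFindChild (pvSetChild kids c t) x = pvFindChild kids x
  | .nil, c, x, t, h => by simp [pvSetChild, pvFindChild, h]
  | .cons c' u rest, c, x, t, h => by
    by_cases h' : c = c'
    · subst h'; simp [pvSetChild, pvFindChild, h]
    · by_cases h'' : x = c'
      · simp [pvSetChild, pvFindChild, h', h'']
      · simp [pvSetChild, pvFindChild, h', h'', findChild_setChild_ne rest c x t h]

theorem query_empty (s : List Char) (n d best : Nat) :
    pvQuery pvEmptyTrie s n d best = if n = 0 then d else best := by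
  cases s <;> simp [pvQuery, pvEmptyTrie, pvFindChild]

theorem contains_empty (s : List Char) : pvContains pvEmptyTrie s = false := by
  cases s <;> simp [pvContains, pvEmptyTrie, pvFindChild]

-- the query's running best only raises the answer by a max
theorem query_best_max (tr : PvTrie) (s : List Char) (n : Nat) :
    ∀ (d b : Nat), b ≤ d → pvQuery tr s n d b = max b (pvQuery tr s n d 0) := by
  induction s generalizing tr with
  | nil =>
    intro d b hb
    cases tr with
    | node e ml kids =>
      simp only [pvQuery]
      split <;> omega
  | cons c rest ih =>
    intro d b hb
    cases tr with
    | node e ml kids =>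
      simp only [pvQuery]
      cases hch : pvFindChild kids c with
      | none => dsimp only; split_ifs <;> omega
      | some ch =>
        dsimp only
        rw [ih ch (d + 1) (if n ≤ ml then d else b) (by split_ifs <;> omega),
            ih ch (d + 1) (if n ≤ ml then d else 0) (by split_ifs <;> omega)]
        split_ifs <;> omega

-- the key trie lemma: querying after an insert adds exactly the candidate d + lcp(s, x)
-- when the inserted length m passes the n ≤ m filter
theorem query_insert (x : List Char) :
    ∀ (tr : PvTrie) (s : List Char) (m n d best : Nat), best ≤ d →
      pvQuery (pvInsert tr x m) s n d best =
        if n ≤ m then max (pvQuery tr s n d best) (d + pvLcp s x)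
        else pvQuery tr s n d best := by
  induction x with
  | nil =>
    intro tr s m n d best hb
    cases tr with
    | node e ml kids =>
      cases s with
      | nil =>
        simp only [pvInsert, pvQuery, pvLcp]
        split_ifs <;> omega
      | cons cs sr =>
        simp only [pvInsert, pvQuery, pvLcp]
        cases hch : pvFindChild kids cs with
        | none => dsimp only; split_ifs <;> omega
        | some ch =>
          dsimp only
          rw [query_best_max ch sr n (d+1) (if n ≤ max ml m then d else best)
                (by split_ifs <;> omega),
              query_best_max ch sr n (d+1) (if n ≤ ml then d else best)
                (by split_ifs <;> omega)]
          split_ifs <;> omega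
  | cons cx xr ih =>
    intro tr s m n d best hb
    cases tr with
    | node e ml kids =>
      cases s with
      | nil =>
        simp only [pvInsert, pvQuery, pvLcp]
        split_ifs <;> omega
      | cons cs sr =>
        simp only [pvInsert, pvQuery]
        by_cases hcc : cs = cx
        · subst hcc
          rw [findChild_setChild_self]
          have hl : pvLcp (cs :: sr) (cs :: xr) = pvLcp sr xr + 1 := by simp [pvLcp]
          rw [hl]
          cases hch : pvFindChild kids cs with
          | none =>
            simp only [Option.getD_none]
            rw [ih pvEmptyTrie sr m n (d+1) (if n ≤ max ml m then d else best)
                  (by split_ifs <;> omega),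
                query_empty]
            split_ifs <;> omega
          | some ch =>
            simp only [Option.getD_some]
            rw [ih ch sr m n (d+1) (if n ≤ max ml m then d else best)
                  (by split_ifs <;> omega)]
            rw [query_best_max ch sr n (d+1) (if n ≤ max ml m then d else best)
                  (by split_ifs <;> omega),
                query_best_max ch sr n (d+1) (if n ≤ ml then d else best)
                  (by split_ifs <;> omega)]
            split_ifs <;> omega
        · rw [findChild_setChild_ne kids cx cs _ hcc]
          have hl : pvLcp (cs :: sr) (cx :: xr) = 0 := by simp [pvLcp, hcc]
          rw [hl]
          cases hch : pvFindChild kids cs with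
          | none => dsimp only; split_ifs <;> omega
          | some ch =>
            dsimp only
            rw [query_best_max ch sr n (d+1) (if n ≤ max ml m then d else best)
                  (by split_ifs <;> omega),
                query_best_max ch sr n (d+1) (if n ≤ ml then d else best)
                  (by split_ifs <;> omega)]
            split_ifs <;> omega

theorem contains_insert (x : List Char) :
    ∀ (tr : PvTrie) (s : List Char) (m : Nat),
      pvContains (pvInsert tr x m) s = (pvContains tr s || decide (s = x)) := by
  induction x with
  | nil =>
    intro tr s m
    cases tr with
    | node e ml kids =>
      cases s with
      | nil => simp [pvInsert, pvContains]
      | cons cs sr => simp [pvInsert, pvContains]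
  | cons cx xr ih =>
    intro tr s m
    cases tr with
    | node e ml kids =>
      cases s with
      | nil => simp [pvInsert, pvContains]
      | cons cs sr =>
        simp only [pvInsert, pvContains]
        by_cases hcc : cs = cx
        · subst hcc
          rw [findChild_setChild_self]
          cases hch : pvFindChild kids cs with
          | none =>
            simp only [Option.getD_none, ih, contains_empty, Bool.false_or]
            simp
          | some ch =>
            simp only [Option.getD_some, ih]
            simp
        · rw [findChild_setChild_ne kids cx cs _ hcc]
          have : (decide (cs :: sr = cx :: xr)) = false := by simp [hcc]
          rw [this]
          cases pvFindChild kids cs <;> simp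

-- the trie built from res answers the length-filtered max-lcp fold
theorem query_foldl (res : List (List Char)) :
    ∀ (tr : PvTrie) (s : List Char) (n : Nat),
      pvQuery (res.foldl (fun t r => pvInsert t r r.length) tr) s n 0 0 =
        res.foldl (fun cut s2 => if n ≤ s2.length then max cut (pvLcp s s2) else cut)
          (pvQuery tr s n 0 0) := by
  induction res with
  | nil => intro tr s n; simp
  | cons r rest ih =>
    intro tr s n
    simp only [List.foldl_cons]
    rw [ih, query_insert r tr s r.length n 0 0 (le_refl 0)]
    split <;> simp

theorem contains_foldl (res : List (List Char)) :
    ∀ (tr : PvTrie) (t : List Char),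
      pvContains (res.foldl (fun tr r => pvInsert tr r r.length) tr) t =
        (pvContains tr t || decide (t ∈ res)) := by
  induction res with
  | nil => intro tr t; simp
  | cons r rest ih =>
    intro tr t
    simp only [List.foldl_cons]
    rw [ih, contains_insert r tr t r.length]
    by_cases h : t = r <;> by_cases h2 : t ∈ rest <;> simp [h, h2]

-- trim phases agree: B's trie is the trie of A's accumulated result list, and the trie
-- query computes exactly A's nested prefix scan
theorem trim_eq :
    ∀ (seqe res : List (List Char)),
      seqe.foldl
          (fun (res : List (List Char)) (s : List Char) =>
            let n := s.length
            let maxIdx :=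
              res.foldl
                (fun maxIdx s2 =>
                  if n > s2.length then maxIdx
                  else
                    (List.range' maxIdx (n + 1 - maxIdx)).foldl
                      (fun acc i => if s.take i = s2.take i then i else acc) maxIdx)
                0
            let t := s.drop maxIdx
            if t ≠ [] ∧ t ∉ res then res ++ [t] else res) res =
        (seqe.foldl
            (fun (st : PvTrie × List (List Char)) s =>
              let n := s.length
              let best := pvQuery st.1 s n 0 0
              let t := s.drop best
              if t = [] then st
              else if pvContains st.1 t then st
              else (pvInsert st.1 t t.length, st.2 ++ [t]))
            (res.foldl (fun tr r => pvInsert tr r r.length) pvEmptyTrie, res)).2 := by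
  intro seqe
  induction seqe with
  | nil => intro res; simp
  | cons s rest ih =>
    intro res
    simp only [List.foldl_cons]
    have hcut :
        res.foldl
            (fun maxIdx s2 =>
              if s.length > s2.length then maxIdx
              else
                (List.range' maxIdx (s.length + 1 - maxIdx)).foldl
                  (fun acc i => if s.take i = s2.take i then i else acc) maxIdx)
            0 =
          pvQuery (res.foldl (fun tr r => pvInsert tr r r.length) pvEmptyTrie) s s.length 0 0 := by
    -- both sides equal the length-filtered max-lcp fold over res
      rw [query_foldl, query_empty]
      have hbase : (if s.length = 0 then 0 else 0) = 0 := by split <;> rfl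
      rw [hbase]
      apply PySem.List.foldl_congr_mem
      intro acc s2 _
      by_cases h : s.length > s2.length
      · have : ¬ s.length ≤ s2.length := by omega
        simp [h, this]
      · have h' : s.length ≤ s2.length := by omega
        simp [h, h', inner_eq_max]
    simp only [hcut]
    set cut := pvQuery (res.foldl (fun tr r => pvInsert tr r r.length) pvEmptyTrie) s s.length 0 0 with hc
    set t := s.drop cut with ht
    by_cases h0 : t = []
    · simp only [h0, if_true, ne_eq, not_true_eq_false, false_and, if_false]
      exact ih res
    · rw [contains_foldl res pvEmptyTrie t, contains_empty]
      by_cases hmem : t ∈ res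
      · simp only [h0, if_false, hmem, decide_true, Bool.false_or, if_true, ne_eq,
          not_true_eq_false, and_false, if_false]
        exact ih res
      · simp only [h0, if_false, hmem, decide_false, Bool.false_or, Bool.false_eq_true,
          ne_eq, not_false_eq_true, and_self, if_true]
        have hfold : (res ++ [t]).foldl (fun tr r => pvInsert tr r r.length) pvEmptyTrie =
            pvInsert (res.foldl (fun tr r => pvInsert tr r r.length) pvEmptyTrie) t t.length := by
          rw [List.foldl_append]; rfl
        rw [← hfold]
        exact ih (res ++ [t])

-- ===== VERDICT (by name: the statement is the Claim_ definition above) =====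
theorem ottimizzaSequenze_spec : Claim_equal_ottimizzaSequenze := by
  intro sequenze _
  show ottimizzaSequenze sequenze = ottimizzaSequenze_alt sequenze
  unfold ottimizzaSequenze ottimizzaSequenze_alt
  apply congrArg
  unfold pvA_rimuoviSimili pvA_accorciaSequenze pvB_dedup pvB_trim
  rw [show (PySem.Set.empty : PySem.Set (List Char)) = ([] : List (List Char)) from rfl]
  have h1 := dedup_eq (sequenze.map String.toList) []
  simp only [List.map_nil] at h1
  rw [h1]
  exact trim_eq _ []
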